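-- pv_equiv track=rewrite | github.com/SauravSinha76/scaler | class6/find_pairs.py | solve
-- ===== SOURCE A (Python) =====
-- def solve(A):
--     n = len(A)
--     count =0
--     ans =0
--     for i in range(n-1,-1,-1):
--         if A[i] == 'G':
--             count += 1
--         elif A[i] == 'A':
--             ans += count
--     return ans % ((10^9)+7)
-- ===== SOURCE B (Python) =====
-- def solve(A):
--     ans = 0
--     for i, x in enumerate(A):
--         if x == 'A':
--             ans += A[i+1:].count('G')
--     return ans % ((10^9)+7)
-- ===== Notes on version B (the rewrite author's own statement) =====
-- stated objective: alternative
-- what changed: Replaced the single reverse pass that maintains a running 'G' counter with a forward enumerate loop that, at each 'A', counts the 'G's in the remaining slice A[i+1:] (nested counting instead of a carried counter); the literal modulus expression ((10^9)+7), i.e. 10, is kept.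
import Mathlib
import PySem

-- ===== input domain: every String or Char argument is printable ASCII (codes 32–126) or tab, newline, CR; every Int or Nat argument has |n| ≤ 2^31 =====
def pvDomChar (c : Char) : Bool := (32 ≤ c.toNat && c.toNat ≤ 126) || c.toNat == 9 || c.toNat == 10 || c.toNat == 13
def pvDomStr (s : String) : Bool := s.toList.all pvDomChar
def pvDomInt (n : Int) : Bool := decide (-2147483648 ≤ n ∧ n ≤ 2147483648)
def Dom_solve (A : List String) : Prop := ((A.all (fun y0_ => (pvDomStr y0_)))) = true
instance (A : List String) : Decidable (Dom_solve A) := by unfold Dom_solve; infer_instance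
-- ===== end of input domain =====

-- B replaces A's reverse pass with a running 'G' counter by a forward enumerate loop
-- that counts the 'G's in the slice after each 'A' (alternative decomposition, not faster).

-- ===== PORT A =====
-- reverse index loop, running count of 'G's, ans += count at each 'A'; modulus is the
-- literal ((10^9)+7) = (10 xor 9)+7 = 10
def solve (A : List String) : Int :=
  let n : Int := PySem.List.len A
  let s :=
    (PySem.List.pyRange (n - 1) (-1) (-1)).foldl
      (fun (s : Int × Int) i =>
        let x := PySem.List.pyGetD A i ""
        if x = "G" then (s.1 + 1, s.2)
        else if x = "A" then (s.1, s.2 + s.1)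
        else s)
      (0, 0)
  PySem.Int.mod s.2 ((PySem.Int.bxor 10 9) + 7)

-- ===== PORT B =====
-- forward enumerate loop: at each 'A' add the count of 'G' in A[i+1:]
def solve_alt (A : List String) : Int :=
  let ans :=
    (PySem.List.enumerate A 0).foldl
      (fun (ans : Int) p =>
        if p.2 = "A" then ans + PySem.List.count (PySem.List.slice A (some (p.1 + 1)) none) "G"
        else ans)
      0
  PySem.Int.mod ans ((PySem.Int.bxor 10 9) + 7)

-- ===== PRECONDITION & SPEC =====
def Spec_solve (A : List String) (out : Int) : Prop := out = solve_alt A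
instance (A : List String) (out : Int) : Decidable (Spec_solve A out) := by unfold Spec_solve; infer_instance

-- ===== CLAIM (what is proved, stated in full; the proofs are below) =====
def Claim_equal_solve : Prop := ∀ (A : List String), Dom_solve A → Spec_solve A (solve A)

-- ===== LEMMAS AND PROOFS =====

-- the number of (i < j) pairs with A[i] = "A", A[j] = "G", by structural recursion
def pvPairs : List String → Int
  | [] => 0
  | x :: t => (if x = "A" then (t.count "G" : Int) else 0) + pvPairs t

theorem pvA_foldr (A : List String) :
    A.foldr
      (fun x (s : Int × Int) =>
        if x = "G" then (s.1 + 1, s.2)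
        else if x = "A" then (s.1, s.2 + s.1)
        else s)
      (0, 0) = ((A.count "G" : Int), pvPairs A) := by
  induction A with
  | nil => simp [pvPairs]
  | cons x t ih =>
    simp only [List.foldr_cons, ih, pvPairs]
    by_cases hG : x = "G"
    · simp [hG]
    · by_cases hA : x = "A"
      · simp [hA, add_comm]
      · simp [hA, hG]

theorem pvA_value (A : List String) :
    solve A = PySem.Int.mod (pvPairs A) ((PySem.Int.bxor 10 9) + 7) := by
  simp only [solve, PySem.List.len_eq]
  rw [show PySem.List.pyRange ((A.length : Int) - 1) (-1) (-1)
      = (PySem.List.pyRange 0 (A.length : Int) 1).reverse from by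
    rw [PySem.List.pyRange_neg_one_eq_reverse]; norm_num]
  rw [List.foldl_reverse]
  rw [show List.foldr
        (fun (x : Int) (s : Int × Int) =>
          if PySem.List.pyGetD A x "" = "G" then (s.1 + 1, s.2)
          else if PySem.List.pyGetD A x "" = "A" then (s.1, s.2 + s.1)
          else s)
        (0, 0) (PySem.List.pyRange 0 (A.length : Int) 1)
      = List.foldr
        (fun (y : String) (s : Int × Int) =>
          if y = "G" then (s.1 + 1, s.2)
          else if y = "A" then (s.1, s.2 + s.1)
          else s)
        (0, 0)
        ((PySem.List.pyRange 0 (A.length : Int) 1).map (fun i => PySem.List.pyGetD A i ""))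
      from (List.foldr_map
        (f := fun i => PySem.List.pyGetD A i "")
        (g := fun (y : String) (s : Int × Int) =>
          if y = "G" then (s.1 + 1, s.2)
          else if y = "A" then (s.1, s.2 + s.1)
          else s)).symm]
  rw [PySem.List.map_pyGetD_pyRange_zero', pvA_foldr]

-- B's fold over the enumerated suffix adds exactly pvPairs of that suffix
theorem pvB_fold (A : List String) : ∀ (suf pre : List String) (acc : Int),
    A = pre ++ suf →
    (PySem.List.enumerate suf (pre.length : Int)).foldl
      (fun (ans : Int) p =>
        if p.2 = "A" then ans + PySem.List.count (PySem.List.slice A (some (p.1 + 1)) none) "G"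
        else ans)
      acc = acc + pvPairs suf := by
  intro suf
  induction suf with
  | nil => intro pre acc h; simp [PySem.List.enumerate, pvPairs]
  | cons x t ih =>
    intro pre acc h
    rw [PySem.List.enumerate_cons]
    simp only [List.foldl_cons]
    have hs : PySem.List.slice A (some ((pre.length : Int) + 1)) none = t := by
      rw [show ((pre.length : Int) + 1) = ((pre.length + 1 : Nat) : Int) from by push_cast; ring,
        PySem.List.slice_from_natCast, h]
      rw [show pre.length + 1 = (pre ++ [x]).length from by simp]
      rw [show pre ++ x :: t = (pre ++ [x]) ++ t from by simp]
      exact List.drop_left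
    have h' : A = (pre ++ [x]) ++ t := by simp [h]
    have hlen : ((pre ++ [x]).length : Int) = (pre.length : Int) + 1 := by simp
    by_cases hA : x = "A"
    · subst hA
      rw [if_pos rfl]
      have := ih (pre ++ ["A"]) (acc + PySem.List.count (PySem.List.slice A (some ((pre.length : Int) + 1)) none) "G") h'
      rw [hlen] at this
      rw [this, hs, PySem.List.count_eq, pvPairs]
      simp
      ring
    · rw [if_neg hA]
      have := ih (pre ++ [x]) acc h'
      rw [hlen] at this
      rw [this, pvPairs]
      simp [hA]

-- ===== VERDICT (by name: the statement is the Claim_ definition above) =====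
theorem solve_spec : Claim_equal_solve := by
  intro A _
  unfold Spec_solve
  rw [pvA_value]
  simp only [solve_alt]
  have := pvB_fold A A [] 0 (by simp)
  simp only [List.length_nil, Nat.cast_zero, zero_add] at this
  rw [this]
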